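-- pv_equiv track=rewrite | github.com/adobe-research/mobile_table_readability_www_2023 | readability/code/generate_table_data.py | get_preorder_str
-- ===== SOURCE A (Python) =====
-- def get_preorder_str(arr, margin):
--     l_eles = []
--     cur_eq_set = [arr[0][1]]
--     for idx in range(1, len(arr)):
--         diff = arr[idx-1][0] - arr[idx][0]
--         if diff <= margin:
--             cur_eq_set.append(arr[idx][1])
--         else:
--             l_eles.append(cur_eq_set)
--             cur_eq_set = [arr[idx][1]]
--     l_eles.append(cur_eq_set)
--     set_strs = []
--     for eq_set in l_eles:
--         eq_set.sort()
--         set_str = '='.join(eq_set)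
--         set_strs.append(set_str)
--     return '>'.join(set_strs)
-- ===== SOURCE B (Python) =====
-- def get_preorder_str(arr, margin):
--     n = len(arr)
--     breaks = [i for i in range(1, n) if arr[i - 1][0] - arr[i][0] > margin]
--     bounds = [0] + breaks + [n]
--     segs = [arr[bounds[j]:bounds[j + 1]] for j in range(len(bounds) - 1)]
--     return '>'.join('='.join(sorted(r[1] for r in seg)) for seg in segs)
-- ===== Notes on version B (the rewrite author's own statement) =====
-- stated objective: alternative
-- what changed: Instead of one sequential pass that accumulates the current group and flushes it at each large gap, B first computes the list of break positions, derives segment bounds, and slices arr into segments which are sorted and joined.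
-- crash fix: On an empty arr A raises IndexError (arr[0]); B returns the empty string. — e.g. on get_preorder_str([], 0): A raises IndexError, B returns ""
import Mathlib
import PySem

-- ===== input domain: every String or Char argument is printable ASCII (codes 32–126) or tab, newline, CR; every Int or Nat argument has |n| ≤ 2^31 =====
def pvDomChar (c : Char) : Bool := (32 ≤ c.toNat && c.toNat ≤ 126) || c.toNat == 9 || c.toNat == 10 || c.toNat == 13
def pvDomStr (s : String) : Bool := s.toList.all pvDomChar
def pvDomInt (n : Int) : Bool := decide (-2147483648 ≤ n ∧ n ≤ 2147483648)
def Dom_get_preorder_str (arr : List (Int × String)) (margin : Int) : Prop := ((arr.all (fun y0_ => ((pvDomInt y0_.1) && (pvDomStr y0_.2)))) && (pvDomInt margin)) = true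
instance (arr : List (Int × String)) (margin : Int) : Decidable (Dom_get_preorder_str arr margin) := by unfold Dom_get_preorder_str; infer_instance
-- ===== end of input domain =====

-- B replaces A's sequential group-accumulation pass by computing break positions and slicing arr into segments (alternative decomposition, same cost).


-- ===== PORT A =====
def get_preorder_str (arr : List (Int × String)) (margin : Int) : String :=
  match arr with
  | [] => ""  -- Python raises IndexError at arr[0]; excluded by Pre_
  | a0 :: _ =>
    let d : Int × String := (0, "")
    let st := (PySem.List.pyRange 1 (arr.length : Int) 1).foldl
      (fun (st : List (List String) × List String) idx =>
        let diff := (PySem.List.pyGetD arr (idx - 1) d).1 - (PySem.List.pyGetD arr idx d).1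
        if diff ≤ margin then (st.1, st.2 ++ [(PySem.List.pyGetD arr idx d).2])
        else (st.1 ++ [st.2], [(PySem.List.pyGetD arr idx d).2]))
      ([], [a0.2])
    let l_eles := st.1 ++ [st.2]
    let set_strs := l_eles.map (fun eq_set =>
      PySem.Str.join "=" (PySem.List.sorted eq_set (fun x => x) false))
    PySem.Str.join ">" set_strs

-- ===== PORT B =====
def get_preorder_str_alt (arr : List (Int × String)) (margin : Int) : String :=
  let d : Int × String := (0, "")
  let n : Int := (arr.length : Int)
  let breaks := (PySem.List.pyRange 1 n 1).filter
    (fun i => decide (margin < (PySem.List.pyGetD arr (i - 1) d).1 - (PySem.List.pyGetD arr i d).1))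
  let bounds := 0 :: (breaks ++ [n])
  let segs := (PySem.List.pyRange 0 ((bounds.length : Int) - 1) 1).map
    (fun j => PySem.List.slice arr (some (PySem.List.pyGetD bounds j 0)) (some (PySem.List.pyGetD bounds (j + 1) 0)))
  PySem.Str.join ">" (segs.map (fun seg =>
    PySem.Str.join "=" (PySem.List.sorted (seg.map (fun r => r.2)) (fun x => x) false)))

-- ===== PRECONDITION & SPEC =====
-- Pre_ excludes only the empty list, on which the Python A raises IndexError at arr[0].
def Pre_get_preorder_str (arr : List (Int × String)) (margin : Int) : Prop := arr ≠ []
instance (arr : List (Int × String)) (margin : Int) : Decidable (Pre_get_preorder_str arr margin) := by unfold Pre_get_preorder_str; infer_instance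
def pvWitness_get_preorder_str : (List (Int × String)) × Int := ([(5, "b"), (1, "a"), (0, "c")], 2)

-- On an empty arr A raises IndexError (arr[0]); B returns the empty string.
def Raises_get_preorder_str (arr : List (Int × String)) (margin : Int) : Prop := arr = []
instance (arr : List (Int × String)) (margin : Int) : Decidable (Raises_get_preorder_str arr margin) := by unfold Raises_get_preorder_str; infer_instance
def pvRaiseWitness_get_preorder_str : (List (Int × String)) × Int := ([], 0)
def pvRaiseWitnessOut_get_preorder_str : String := ""

def Spec_get_preorder_str (arr : List (Int × String)) (margin : Int) (out : String) : Prop := out = get_preorder_str_alt arr margin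
instance (arr : List (Int × String)) (margin : Int) (out : String) : Decidable (Spec_get_preorder_str arr margin out) := by unfold Spec_get_preorder_str; infer_instance

-- ===== CLAIM (what is proved, stated in full; the proofs are below) =====
def Claim_equal_get_preorder_str : Prop := ∀ (arr : List (Int × String)) (margin : Int), Dom_get_preorder_str arr margin → Pre_get_preorder_str arr margin → Spec_get_preorder_str arr margin (get_preorder_str arr margin)
def Claim_raises_get_preorder_str : Prop := (∀ (arr : List (Int × String)) (margin : Int), Dom_get_preorder_str arr margin → Raises_get_preorder_str arr margin → ¬ Pre_get_preorder_str arr margin) ∧ (Dom_get_preorder_str (pvRaiseWitness_get_preorder_str.1) (pvRaiseWitness_get_preorder_str.2) ∧ Raises_get_preorder_str (pvRaiseWitness_get_preorder_str.1) (pvRaiseWitness_get_preorder_str.2) ∧ get_preorder_str_alt (pvRaiseWitness_get_preorder_str.1) (pvRaiseWitness_get_preorder_str.2) = pvRaiseWitnessOut_get_preorder_str)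

-- ===== LEMMAS AND PROOFS =====

-- strings of the slice arr[a:b]
def gstr (arr : List (Int × String)) (a b : Int) : List String :=
  (PySem.List.slice arr (some a) (some b)).map (fun r => r.2)

theorem adj_range {β : Type} (f : Int → Int → β) (dd : Int) :
    ∀ (l : List Int), (List.range (l.length - 1)).map (fun k => f (l.getD k dd) (l.getD (k + 1) dd))
      = List.zipWith f l l.tail
  | [] => by simp
  | [x] => by simp
  | x :: y :: t => by
    have ih := adj_range f dd (y :: t)
    simp only [List.length_cons, Nat.add_sub_cancel, List.range_succ_eq_map, List.map_cons,
      List.map_map, List.tail_cons, List.zipWith_cons_cons] at *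
    refine congrArg₂ _ rfl ?_
    rw [← ih]
    rfl

theorem zip_bounds {β : Type} (f : Int → Int → β) (hi : Int) :
    ∀ (bs : List Int) (lo : Int),
      List.zipWith f (lo :: (bs ++ [hi])) (bs ++ [hi])
        = List.zipWith f (lo :: bs) bs ++ [f (bs.getLastD lo) hi]
  | [], lo => by simp
  | b :: bs, lo => by
    simp only [List.cons_append, List.zipWith_cons_cons, List.getLastD_cons, zip_bounds f hi bs b]

theorem gstr_singleton (arr : List (Int × String)) (k : Nat) (hk : k < arr.length) :
    gstr arr (k : Int) ((k : Int) + 1) = [(arr[k]).2] := by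
  unfold gstr
  have : ((k : Int) + 1) = ((k + 1 : Nat) : Int) := by push_cast; ring
  have hd : arr.drop k = arr[k] :: arr.drop (k + 1) := List.drop_eq_getElem_cons hk
  rw [this, PySem.List.slice_natCast, show k + 1 - k = 1 from by omega, hd]
  rfl

theorem gstr_extend (arr : List (Int × String)) (lo : Int) (k : Nat)
    (h0 : 0 ≤ lo) (hlk : lo ≤ (k : Int)) (hk : k < arr.length) :
    gstr arr lo (k : Int) ++ [(arr[k]).2] = gstr arr lo ((k : Int) + 1) := by
  unfold gstr
  have h1 : ((k : Int) + 1) = ((k + 1 : Nat) : Int) := by push_cast; ring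
  rw [h1, PySem.List.slice_toNat arr h0 (by positivity), PySem.List.slice_toNat arr h0 (by positivity)]
  have hkn : ((k : Int)).toNat = k := by omega
  have hk1 : (((k + 1 : Nat) : Int)).toNat = k + 1 := by omega
  rw [hkn, hk1]
  have hlo : lo.toNat ≤ k := by omega
  have hidx : k - lo.toNat < (arr.drop lo.toNat).length := by
    simp [List.length_drop]; omega
  have hstep : k + 1 - lo.toNat = (k - lo.toNat) + 1 := by omega
  rw [hstep, List.take_add_one]
  have : (arr.drop lo.toNat)[k - lo.toNat]? = some arr[k] := by
    rw [List.getElem?_drop]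
    have : lo.toNat + (k - lo.toNat) = k := by omega
    rw [this, List.getElem?_eq_getElem hk]
  simp [this]

theorem adj_pyRange {β : Type} (f : Int → Int → β) (dd : Int) (l : List Int) :
    (PySem.List.pyRange 0 ((l.length : Int) - 1) 1).map
      (fun j => f (PySem.List.pyGetD l j dd) (PySem.List.pyGetD l (j + 1) dd))
      = List.zipWith f l l.tail := by
  rw [PySem.List.pyRange_one, List.map_map, ← adj_range f dd l]
  have hlen : (((l.length : Int) - 1) - 0).toNat = l.length - 1 := by omega
  rw [hlen]
  apply List.map_congr_left
  intro k hk
  simp only [Function.comp]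
  rw [show ((0:Int) + (k:Int)) = ((k : Nat) : Int) from by omega,
      show ((k:Int) + 1) = ((k + 1 : Nat) : Int) from by push_cast; ring]
  simp only [PySem.List.pyGetD_natCast]

theorem bk_bounds (P : Int → Bool) (k : Int) (hk : 0 ≤ k) :
    0 ≤ (((PySem.List.pyRange 1 k 1).filter P).getLastD 0) ∧
      (((PySem.List.pyRange 1 k 1).filter P).getLastD 0) ≤ k := by
  cases h : (PySem.List.pyRange 1 k 1).filter P with
  | nil => simp [hk]
  | cons b bs =>
    have hm : (b :: bs).getLastD 0 ∈ b :: bs := by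
      have h2 : (b :: bs).getLastD 0 = (b :: bs).getLast (by simp) := by
        simp [List.getLastD_eq_getLast?, List.getLast?_eq_some_getLast]
      rw [h2]
      exact List.getLast_mem _
    have hm2 : (b :: bs).getLastD 0 ∈ (PySem.List.pyRange 1 k 1).filter P := h ▸ hm
    have := (PySem.List.mem_pyRange_one).1 (List.mem_of_mem_filter hm2)
    omega

theorem inv_loop (a0 : Int × String) (rest : List (Int × String)) (margin : Int) :
    ∀ k : Nat, 1 ≤ k → k ≤ (a0 :: rest).length →
    ((PySem.List.pyRange 1 (k : Int) 1).foldl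
       (fun (st : List (List String) × List String) idx =>
          let diff := (PySem.List.pyGetD (a0 :: rest) (idx - 1) ((0 : Int), "")).1
                        - (PySem.List.pyGetD (a0 :: rest) idx ((0 : Int), "")).1
          if diff ≤ margin then (st.1, st.2 ++ [(PySem.List.pyGetD (a0 :: rest) idx ((0 : Int), "")).2])
          else (st.1 ++ [st.2], [(PySem.List.pyGetD (a0 :: rest) idx ((0 : Int), "")).2]))
       ([], [a0.2]))
    = (List.zipWith (gstr (a0 :: rest))
         (0 :: ((PySem.List.pyRange 1 (k : Int) 1).filter
            (fun i => decide (margin < (PySem.List.pyGetD (a0 :: rest) (i - 1) ((0 : Int), "")).1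
                        - (PySem.List.pyGetD (a0 :: rest) i ((0 : Int), "")).1))))
         ((PySem.List.pyRange 1 (k : Int) 1).filter
            (fun i => decide (margin < (PySem.List.pyGetD (a0 :: rest) (i - 1) ((0 : Int), "")).1
                        - (PySem.List.pyGetD (a0 :: rest) i ((0 : Int), "")).1))),
       gstr (a0 :: rest)
         (((PySem.List.pyRange 1 (k : Int) 1).filter
            (fun i => decide (margin < (PySem.List.pyGetD (a0 :: rest) (i - 1) ((0 : Int), "")).1
                        - (PySem.List.pyGetD (a0 :: rest) i ((0 : Int), "")).1))).getLastD 0)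
         (k : Int)) := by
  intro k
  induction k with
  | zero => omega
  | succ k ih =>
    intro _ hk1
    by_cases hk : 1 ≤ k
    · -- inductive step: k ≥ 1, process index k
      have ihk := ih hk (by simpa using Nat.le_of_succ_le hk1)
      have hcast : ((k + 1 : Nat) : Int) = (k : Int) + 1 := by push_cast; ring
      have hsplit := PySem.List.pyRange_one_succ_right (a := 1) (b := (k : Int)) (by exact_mod_cast hk)
      rw [hcast, hsplit, List.foldl_append, List.filter_append, ihk]
      have hklen : k < (a0 :: rest).length := by omega
      have hget : PySem.List.pyGetD (a0 :: rest) (k : Int) ((0 : Int), "") = (a0 :: rest)[k] := by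
        rw [PySem.List.pyGetD_natCast]
        exact List.getD_eq_getElem _ _ hklen
      by_cases hb : (PySem.List.pyGetD (a0 :: rest) ((k : Int) - 1) ((0 : Int), "")).1
                      - (PySem.List.pyGetD (a0 :: rest) (k : Int) ((0 : Int), "")).1 ≤ margin
      · -- no break at k
        have hlast := bk_bounds (fun i => decide (margin < (PySem.List.pyGetD (a0 :: rest) (i - 1) ((0 : Int), "")).1
                        - (PySem.List.pyGetD (a0 :: rest) i ((0 : Int), "")).1)) (k : Int) (by positivity)
        simp only [List.foldl_cons, List.foldl_nil, List.filter_cons, List.filter_nil]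
        rw [if_pos hb, if_neg (by simpa using hb)]
        simp only [List.append_nil]
        rw [hget, gstr_extend (a0 :: rest) _ k hlast.1 hlast.2 hklen]
      · -- break at k
        simp only [List.foldl_cons, List.foldl_nil, List.filter_cons, List.filter_nil]
        rw [if_neg hb, if_pos (by simpa using (lt_of_not_ge hb))]
        rw [hget]
        refine Prod.ext ?_ ?_
        · simp only
          rw [zip_bounds (gstr (a0 :: rest)) (k : Int) _ 0]
        · simp only
          rw [List.getLastD_concat, gstr_singleton (a0 :: rest) k hklen]
    · -- base: k = 0, so k+1 = 1
      have hk0 : k = 0 := by omega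
      subst hk0
      rw [show ((0 + 1 : Nat) : Int) = 1 from by norm_num, PySem.List.pyRange_one_eq_nil (le_refl 1)]
      simp only [List.foldl_nil, List.filter_nil, List.zipWith_nil_right]
      have := gstr_singleton (a0 :: rest) 0 (by simp)
      simp only [Nat.cast_zero, zero_add] at this
      rw [List.getLastD_nil, this]
      rfl

-- A's fold and B's slicing both equal the zipWith-over-bounds form
theorem main_eq (arr : List (Int × String)) (margin : Int) (hpre : arr ≠ []) :
    get_preorder_str arr margin = get_preorder_str_alt arr margin := by
  cases arr with
  | nil => exact absurd rfl hpre
  | cons a0 rest =>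
    simp only [get_preorder_str, get_preorder_str_alt]
    rw [inv_loop a0 rest margin (a0 :: rest).length (by simp) le_rfl]
    rw [adj_pyRange (fun a b => PySem.List.slice (a0 :: rest) (some a) (some b)) 0]
    simp only [List.tail_cons, List.map_zipWith]
    rw [zip_bounds (fun x y => PySem.Str.join "="
          (PySem.List.sorted (List.map (fun r => r.2) (PySem.List.slice (a0 :: rest) (some x) (some y)))
            (fun x => x) false)) (((a0 :: rest).length : Int))]
    simp only [List.map_append, List.map_cons, List.map_nil, List.map_zipWith]
    rfl

-- ===== VERDICT (by name: the statement is the Claim_ definition above) =====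
theorem get_preorder_str_spec : Claim_equal_get_preorder_str := by
  intro arr margin _ hpre
  unfold Spec_get_preorder_str
  exact main_eq arr margin hpre

@[simp] theorem get_preorder_str_raises : Claim_raises_get_preorder_str := by
  unfold Claim_raises_get_preorder_str
  exact ⟨by intro arr margin _ hr hp; exact hp hr, by decide⟩
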